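-- pv_equiv track=rewrite | github.com/fermenreq/TSP-VRP-GENETICS-ALGORITHM | TSP.py | penalty
-- ===== SOURCE A (Python) =====
-- def penalty(chromosome):
--         actual = chromosome
--         value_penalty = 0
--         for i in actual:
--             times = 0
--             times = actual.count(i)
--             if times > 1:
--                 value_penalty+= 100 * abs(times - len(actual))
--         return value_penalty
-- ===== SOURCE B (Python) =====
-- def penalty(chromosome):
--     counts = {}
--     for x in chromosome:
--         counts[x] = counts.get(x, 0) + 1
--     n = len(chromosome)
--     total = 0
--     for c in counts.values():
--         if c > 1:
--             total += 100 * c * (n - c)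
--     return total
-- ===== Notes on version B (the rewrite author's own statement) =====
-- stated objective: faster
-- what changed: B builds a count dictionary in one pass and sums 100*c*(n-c) once per distinct value with multiplicity c>1, instead of A's per-element list.count scan inside the loop.
import Mathlib
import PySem

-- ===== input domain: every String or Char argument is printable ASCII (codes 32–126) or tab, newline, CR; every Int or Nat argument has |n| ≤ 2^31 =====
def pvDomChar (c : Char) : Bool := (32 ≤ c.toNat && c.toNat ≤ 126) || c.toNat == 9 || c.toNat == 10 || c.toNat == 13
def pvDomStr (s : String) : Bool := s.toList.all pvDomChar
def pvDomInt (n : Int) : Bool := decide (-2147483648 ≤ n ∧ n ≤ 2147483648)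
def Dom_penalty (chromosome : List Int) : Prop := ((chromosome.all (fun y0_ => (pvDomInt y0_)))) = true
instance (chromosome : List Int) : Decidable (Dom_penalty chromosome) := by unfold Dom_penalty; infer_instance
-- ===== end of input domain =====

-- B replaces A's quadratic per-element .count scans with one counting-dict pass
-- plus one pass over the distinct values (objective: faster, O(n^2) -> O(n)).

-- ===== PORT A =====
-- for i in actual: times = actual.count(i); if times > 1: value_penalty += 100 * abs(times - len(actual))
def penalty (chromosome : List Int) : Int :=
  chromosome.foldl
    (fun value_penalty i =>
      let times : Int := (PySem.List.count chromosome i : Int)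
      if times > 1 then
        value_penalty + 100 * ((times - (chromosome.length : Int)).natAbs : Int)
      else value_penalty)
    0

-- ===== PORT B =====
-- counts[x] = counts.get(x, 0) + 1 for each x; then sum 100*c*(n-c) over values c > 1
def penalty_alt (chromosome : List Int) : Int :=
  let counts := chromosome.foldl (fun d x => d.insert x (d.getD x 0 + 1)) PySem.Dict.empty
  let n : Int := chromosome.length
  counts.values.foldl (fun total c => if c > 1 then total + 100 * c * (n - c) else total) 0

-- ===== PRECONDITION & SPEC =====
def Spec_penalty (chromosome : List Int) (out : Int) : Prop := out = penalty_alt chromosome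
instance (chromosome : List Int) (out : Int) : Decidable (Spec_penalty chromosome out) := by unfold Spec_penalty; infer_instance

-- ===== CLAIM (what is proved, stated in full; the proofs are below) =====
def Claim_equal_penalty : Prop := ∀ (chromosome : List Int), Dom_penalty chromosome → Spec_penalty chromosome (penalty chromosome)

-- ===== LEMMAS AND PROOFS =====

-- a conditional-accumulation foldl is the sum of a 0-padded map
theorem foldl_ite_add (l : List Int) (p : Int → Prop) [DecidablePred p] (g : Int → Int) (a : Int) :
    l.foldl (fun acc x => if p x then acc + g x else acc) a
      = a + (l.map (fun x => if p x then g x else 0)).sum := by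
  have h : (fun (acc x : Int) => if p x then acc + g x else acc)
      = fun acc x => acc + (if p x then g x else 0) := by
    funext acc x; split <;> simp
  rw [h, PySem.List.foldl_add]

-- A's accumulation as a mapped sum
theorem penalty_eq_sum (xs : List Int) :
    penalty xs = (xs.map (fun i =>
      if (xs.count i : Int) > 1
      then 100 * (((xs.count i : Int) - (xs.length : Int)).natAbs : Int)
      else 0)).sum := by
  simp only [penalty, PySem.List.count_eq]
  rw [foldl_ite_add xs (fun i => (xs.count i : Int) > 1)
      (fun i => 100 * (((xs.count i : Int) - (xs.length : Int)).natAbs : Int)) 0]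
  simp

-- B's accumulation as a mapped sum over the distinct elements
theorem penalty_alt_eq_sum (xs : List Int) :
    penalty_alt xs = ((PySem.Set.ofList xs).map (fun k =>
      if (xs.count k : Int) > 1
      then 100 * (xs.count k : Int) * ((xs.length : Int) - (xs.count k : Int))
      else 0)).sum := by
  simp only [penalty_alt]
  rw [PySem.Dict.foldl_insert_getD_add_one_eq_counter,
      PySem.Dict.values_eq_map_keys _ (PySem.Dict.nodup_keys_counter xs) 0,
      PySem.Dict.keys_counter,
      foldl_ite_add _ (fun c => c > 1) (fun c => 100 * c * ((xs.length : Int) - c)) 0]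
  simp [List.map_map, Function.comp_def, PySem.Dict.getD_counter]

-- ===== VERDICT (by name: the statement is the Claim_ definition above) =====
theorem penalty_spec : Claim_equal_penalty := by
  intro xs _
  show penalty xs = penalty_alt xs
  rw [penalty_eq_sum, penalty_alt_eq_sum,
      Finset.sum_list_map_count xs (fun i =>
        if (xs.count i : Int) > 1
        then 100 * (((xs.count i : Int) - (xs.length : Int)).natAbs : Int)
        else 0)]
  have hfin : (PySem.Set.ofList xs).toFinset = xs.toFinset := by
    ext y; simp [PySem.Set.mem_ofList]
  rw [← List.sum_toFinset _ (PySem.Set.nodup_ofList xs), hfin]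
  apply Finset.sum_congr rfl
  intro m hm
  have hle : (xs.count m : Int) ≤ (xs.length : Int) := by
    exact_mod_cast List.count_le_length
  by_cases h : (xs.count m : Int) > 1
  · simp only [if_pos h, nsmul_eq_mul]
    have habs : (((xs.count m : Int) - (xs.length : Int)).natAbs : Int)
        = (xs.length : Int) - (xs.count m : Int) := by omega
    rw [habs]; ring
  · have h' : ¬ 1 < xs.count m := by exact_mod_cast h
    simp [h']
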